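-- pv_equiv track=rewrite | github.com/vincecharming/technical_interview | python/utils/hacker_rank.py | add_one_to_array_num
-- ===== SOURCE A (Python) =====
-- def add_one_to_array_num(num_arr):
--     '''
--     Adds 1 to a number given as an array
--     :param num_arr: A number as an array, where each value is a positive 0-9 integer
--     :return: The number plus 1 as an array
--     '''
--     # Data Validation on param
--     error_message = 'The input must be a number as an array. Example: 412 would be [4, 1, 2].'
--     if not isinstance(num_arr, list):
--         raise TypeError(error_message)
--     if not num_arr:
--         raise ValueError(error_message)
--
--     # Iterating reversed through the indices allows us to start at the one's place and work up
--     for j in reversed(range(len(num_arr))):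
--         # Accounts for carrying the 1 to the next place over
--         if (num_arr[j] + 1) == 10:
--             num_arr[j] = 0
--             # Accounts for having to carry the one all the way to start of the array
--             if j == 0:
--                 num_arr.insert(j, 1)
--         else:
--             num_arr[j] += 1
--             break
--
--     return num_arr
-- ===== SOURCE B (Python) =====
-- def add_one_to_array_num(num_arr):
--     '''
--     Adds 1 to a number given as an array (two-phase: find the trailing
--     block of 9s, then increment the digit before it and zero the block).
--     '''
--     error_message = 'The input must be a number as an array. Example: 412 would be [4, 1, 2].'
--     if not isinstance(num_arr, list):
--         raise TypeError(error_message)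
--     if not num_arr:
--         raise ValueError(error_message)
--
--     # k = index just past the last non-9 digit (digits k..end are all 9)
--     k = len(num_arr)
--     while k > 0 and num_arr[k - 1] == 9:
--         k -= 1
--
--     if k == 0:
--         # all digits are 9: zero everything and prepend the carried 1
--         for j in range(len(num_arr)):
--             num_arr[j] = 0
--         num_arr.insert(0, 1)
--     else:
--         num_arr[k - 1] += 1
--         for j in range(k, len(num_arr)):
--             num_arr[j] = 0
--     return num_arr
-- ===== Notes on version B (the rewrite author's own statement) =====
-- stated objective: alternative
-- what changed: A interleaves carrying with a single reversed loop that mutates as it scans and breaks on the first non-9; B first finds the boundary of the trailing block of 9s with a while loop, then does the increment and a separate forward zeroing pass (or prepends the carry in the all-9s case).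
import Mathlib
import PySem

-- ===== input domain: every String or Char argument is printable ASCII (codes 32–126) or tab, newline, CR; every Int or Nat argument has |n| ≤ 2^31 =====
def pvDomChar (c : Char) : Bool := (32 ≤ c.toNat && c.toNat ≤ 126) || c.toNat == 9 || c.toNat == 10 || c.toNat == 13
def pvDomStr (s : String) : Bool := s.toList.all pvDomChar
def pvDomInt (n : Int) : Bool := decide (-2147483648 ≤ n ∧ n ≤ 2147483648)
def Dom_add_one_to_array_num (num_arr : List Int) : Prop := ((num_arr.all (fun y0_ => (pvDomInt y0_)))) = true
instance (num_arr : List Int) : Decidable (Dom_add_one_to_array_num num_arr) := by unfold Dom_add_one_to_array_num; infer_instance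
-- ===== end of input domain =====

-- B replaces A's single mutate-as-you-scan reversed loop (with break and in-loop carry)
-- by two phases: a while loop locating the trailing block of 9s, then a separate
-- increment + forward zeroing pass. Objective: alternative decomposition, same cost.
-- Both Pythons mutate num_arr in place; the equivalence proved here is about the return
-- value (which is the same mutated list object in both).

-- ===== PORT A =====
-- the reversed for loop: js = reversed(range(len(num_arr))); every j is a valid index,
-- so num_arr[j] is ported exactly as arr[j]?.getD 0 (j < arr.length throughout)
def aGo : List Nat → List Int → List Int
  | [], arr => arr
  | j :: rest, arr =>
    let v := arr[j]?.getD 0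
    if v + 1 == 10 then
      -- num_arr[j] = 0, and at j == 0 also num_arr.insert(0, 1)
      aGo rest (if j == 0 then 1 :: arr.set j 0 else arr.set j 0)
    else
      -- num_arr[j] += 1; break
      arr.set j (v + 1)

def add_one_to_array_num (num_arr : List Int) : List Int :=
  aGo (List.range num_arr.length).reverse num_arr

-- ===== PORT B =====
-- the while loop 'while k > 0 and num_arr[k-1] == 9: k -= 1', started at k = len;
-- k - 1 is a valid index so num_arr[k-1] is ported exactly as getElem?.getD
def bK (arr : List Int) : Nat → Nat
  | 0 => 0
  | k + 1 => if arr[k]?.getD 0 == 9 then bK arr k else k + 1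

def add_one_to_array_num_alt (num_arr : List Int) : List Int :=
  let k := bK num_arr num_arr.length
  if k == 0 then
    -- for j in range(len(num_arr)): num_arr[j] = 0; then insert(0, 1)
    1 :: (List.range num_arr.length).foldl (fun a j => a.set j 0) num_arr
  else
    -- num_arr[k-1] += 1; for j in range(k, len(num_arr)): num_arr[j] = 0
    (List.range' k (num_arr.length - k)).foldl (fun a j => a.set j 0)
      (num_arr.set (k - 1) (num_arr[k - 1]?.getD 0 + 1))

-- ===== PRECONDITION & SPEC =====
-- A raises ValueError on the empty list (and B does too); nothing else is excluded.
def Pre_add_one_to_array_num (num_arr : List Int) : Prop := num_arr ≠ []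
instance (num_arr : List Int) : Decidable (Pre_add_one_to_array_num num_arr) := by
  unfold Pre_add_one_to_array_num; infer_instance
def pvWitness_add_one_to_array_num : List Int := [4, 1, 9]

def Spec_add_one_to_array_num (num_arr : List Int) (out : List Int) : Prop := out = add_one_to_array_num_alt num_arr
instance (num_arr : List Int) (out : List Int) : Decidable (Spec_add_one_to_array_num num_arr out) := by unfold Spec_add_one_to_array_num; infer_instance

-- ===== CLAIM (what is proved, stated in full; the proofs are below) =====
def Claim_equal_add_one_to_array_num : Prop := ∀ (num_arr : List Int), Dom_add_one_to_array_num num_arr → Pre_add_one_to_array_num num_arr → Spec_add_one_to_array_num num_arr (add_one_to_array_num num_arr)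

-- ===== LEMMAS AND PROOFS =====

theorem bK_le (arr : List Int) : ∀ m, bK arr m ≤ m := by
  intro m
  induction m with
  | zero => simp [bK]
  | succ k ih => simp only [bK]; split <;> omega

-- bK only inspects indices < m, so a set at index ≥ m does not change it
theorem bK_set_ge (arr : List Int) (i : Nat) (x : Int) :
    ∀ m, m ≤ i → bK (arr.set i x) m = bK arr m := by
  intro m
  induction m with
  | zero => simp [bK]
  | succ k ih =>
    intro h
    have hg : (arr.set i x)[k]? = arr[k]? := List.getElem?_set_ne (by omega)
    simp only [bK, hg]
    split
    · exact ih (by omega)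
    · rfl

-- a set at an index not hit by the zeroing fold commutes out of the fold
theorem foldl_set_comm (js : List Nat) :
    ∀ (arr : List Int) (i : Nat) (x : Int), (∀ j ∈ js, j ≠ i) →
      js.foldl (fun a j => a.set j 0) (arr.set i x)
        = (js.foldl (fun a j => a.set j 0) arr).set i x := by
  induction js with
  | nil => intro arr i x _; rfl
  | cons j rest ih =>
    intro arr i x h
    have hj : i ≠ j := (h j (by simp)).symm
    simp only [List.foldl_cons]
    rw [List.set_comm _ _ hj, ih _ _ _ (fun j' hj' => h j' (by simp [hj']))]

-- the heart: A's reversed loop over range m equals B's two-phase result, for any m ≤ length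
theorem aGo_eq (m : Nat) : ∀ (arr : List Int), m ≤ arr.length →
    aGo (List.range m).reverse arr =
      (if bK arr m = 0 then
        (if m = 0 then arr else 1 :: (List.range m).foldl (fun a j => a.set j 0) arr)
      else
        (List.range' (bK arr m) (m - bK arr m)).foldl (fun a j => a.set j 0)
          (arr.set (bK arr m - 1) (arr[bK arr m - 1]?.getD 0 + 1))) := by
  induction m with
  | zero => intro arr _; simp [aGo, bK]
  | succ m ih =>
    intro arr hlen
    rw [List.range_succ, List.reverse_append]
    simp only [List.reverse_singleton, List.singleton_append]
    by_cases h9 : arr[m]?.getD 0 = 9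
    · -- carry branch: num_arr[m] = 0 (v + 1 == 10)
      have hcond : (arr[m]?.getD 0 + 1 == (10 : Int)) = true := by simp [h9]
      have hbk : bK arr (m + 1) = bK arr m := by simp [bK, h9]
      by_cases hm : m = 0
      · subst hm
        simp [aGo, bK, h9]
      · -- m ≥ 1: recurse on arr.set m 0 and commute the set out
        have hset : bK (arr.set m 0) m = bK arr m := bK_set_ge arr m 0 m le_rfl
        have hlen' : m ≤ (arr.set m 0).length := by simp; omega
        simp only [aGo, hcond, if_pos]
        rw [if_neg (by simp [hm]), ih (arr.set m 0) hlen', hset]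
        by_cases hk : bK arr m = 0
        · rw [if_pos hk, hbk, if_pos hk, if_neg hm, if_neg (Nat.succ_ne_zero m)]
          rw [foldl_set_comm _ _ _ _ (fun j hj => by
            have := List.mem_range.mp hj; omega), List.foldl_append]
          rfl
        · rw [if_neg hk, hbk, if_neg hk]
          have hkle : bK arr m ≤ m := bK_le arr m
          have hne : m ≠ bK arr m - 1 := by omega
          have hgd : (arr.set m 0)[bK arr m - 1]? = arr[bK arr m - 1]? :=
            List.getElem?_set_ne hne
          rw [hgd, List.set_comm _ _ hne,
            foldl_set_comm _ _ _ _ (fun j hj => by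
              have := List.mem_range'.mp hj; omega)]
          have hr : List.range' (bK arr m) (m + 1 - bK arr m)
              = List.range' (bK arr m) (m - bK arr m) ++ [m] := by
            have h1 : m + 1 - bK arr m = (m - bK arr m) + 1 := by omega
            rw [h1, List.range'_1_concat]
            congr 2
            omega
          rw [hr, List.foldl_append]
          rfl
    · -- no carry: num_arr[m] += 1; break
      have hcond : (arr[m]?.getD 0 + 1 == (10 : Int)) = false := by
        simp
        intro h
        exact absurd (by omega) h9
      have h9b : (arr[m]?.getD 0 == (9 : Int)) = false := by simp [h9]
      have hbk : bK arr (m + 1) = m + 1 := by simp only [bK, h9b]; simp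
      simp only [aGo, hcond, Bool.false_eq_true, if_false]
      rw [hbk, if_neg (by omega)]
      simp

-- ===== VERDICT (by name: the statement is the Claim_ definition above) =====
theorem add_one_to_array_num_spec : Claim_equal_add_one_to_array_num := by
  intro num_arr _ hpre
  unfold Spec_add_one_to_array_num add_one_to_array_num add_one_to_array_num_alt
  rw [aGo_eq num_arr.length num_arr le_rfl]
  have hne : num_arr.length ≠ 0 := by simpa [List.length_eq_zero_iff] using hpre
  by_cases hk : bK num_arr num_arr.length = 0
  · simp [hk, hne]
  · simp [hk]
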